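-- pv_equiv track=rewrite | github.com/dimarkov/sm-cscg | examples/example_dna.py | compute_homopolymer_stats
-- ===== SOURCE A (Python) =====
-- N_OBS = 4
--
-- def compute_homopolymer_stats(obs_seq):
--     """Compute run-length distributions for each nucleotide.
--
--     Returns
--     -------
--     run_lengths : dict mapping obs_idx -> list of run lengths
--     """
--     run_lengths = {o: [] for o in range(N_OBS)}
--     current_sym = obs_seq[0]
--     current_len = 1
--     for t in range(1, len(obs_seq)):
--         if obs_seq[t] == current_sym:
--             current_len += 1
--         else:
--             run_lengths[current_sym].append(current_len)
--             current_sym = obs_seq[t]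
--             current_len = 1
--     run_lengths[current_sym].append(current_len)
--     return run_lengths
-- ===== SOURCE B (Python) =====
-- N_OBS = 4
--
--
-- def _runs(seq):
--     """Decompose seq into its maximal runs as a list of (symbol, length) pairs."""
--     runs = []
--     i, n = 0, len(seq)
--     while i < n:
--         j = i + 1
--         while j < n and seq[j] == seq[i]:
--             j += 1
--         runs.append((seq[i], j - i))
--         i = j
--     return runs
--
--
-- def compute_homopolymer_stats(obs_seq):
--     run_lengths = {o: [] for o in range(N_OBS)}
--     for sym, length in _runs(obs_seq):
--         run_lengths[sym].append(length)
--     return run_lengths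
-- ===== Notes on version B (the rewrite author's own statement) =====
-- stated objective: alternative
-- what changed: B first materializes the list of maximal runs with an iterative two-pointer scan (inner pointer skips past each run) and then fills the per-nucleotide dict in a second simple pass, replacing A's single-pass current_sym/current_len accumulator.
import Mathlib
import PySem

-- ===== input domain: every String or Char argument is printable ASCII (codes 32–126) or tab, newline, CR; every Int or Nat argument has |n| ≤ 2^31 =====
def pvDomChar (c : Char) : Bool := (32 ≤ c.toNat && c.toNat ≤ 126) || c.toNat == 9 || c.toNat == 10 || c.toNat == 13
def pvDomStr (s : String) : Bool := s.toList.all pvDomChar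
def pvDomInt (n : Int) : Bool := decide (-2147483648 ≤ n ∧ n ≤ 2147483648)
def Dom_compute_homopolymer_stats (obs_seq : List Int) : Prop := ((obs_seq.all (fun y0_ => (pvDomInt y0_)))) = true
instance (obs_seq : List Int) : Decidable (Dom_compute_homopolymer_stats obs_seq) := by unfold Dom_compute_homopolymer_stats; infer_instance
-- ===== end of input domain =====

-- B materializes the run list with an iterative two-pointer scan and then fills the dict in a
-- second pass, instead of A's single-pass current_sym/current_len accumulator (alternative, same cost).


-- ===== PORT A =====
-- run_lengths[current_sym].append(current_len) is ported as Dict.modify with default [];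
-- this is exact whenever current_sym is a key of the dict (guaranteed inside Pre_;
-- Python raises KeyError otherwise, and such inputs are excluded by Pre_).
def compute_homopolymer_stats (obs_seq : List Int) : List (Int × List Int) :=
  let run_lengths : PySem.Dict Int (List Int) :=
    (PySem.List.pyRange 0 4 1).foldl (fun d o => d.insert o []) PySem.Dict.empty
  match PySem.List.pyGet? obs_seq 0 with
  | none => []  -- reading the first element raises IndexError on an empty obs_seq (excluded by Pre_)
  | some c0 =>
    let st :=
      (PySem.List.pyRange 1 (obs_seq.length : Int) 1).foldl
        (fun (st : PySem.Dict Int (List Int) × Int × Int) t =>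
          if PySem.List.pyGetD obs_seq t 0 = st.2.1 then (st.1, st.2.1, st.2.2 + 1)
          else (st.1.modify st.2.1 [] (fun l => l ++ [st.2.2]), PySem.List.pyGetD obs_seq t 0, 1))
        (run_lengths, c0, 1)
    (st.1.modify st.2.1 [] (fun l => l ++ [st.2.2])).items

-- ===== PORT B =====
-- inner while loop of _runs: advance j while j < n and seq[j] == seq[i] (x = seq[i]);
-- the Nat fuel argument (always passed as obs_seq.length, the loop takes at most that many steps)
-- only makes the recursion structural, it never changes the computed value
def pvScanRun (obs_seq : List Int) (x : Int) : Nat → Int → Int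
  | 0, j => j
  | fuel + 1, j =>
    if j < (obs_seq.length : Int) ∧ PySem.List.pyGetD obs_seq j 0 = x then
      pvScanRun obs_seq x fuel (j + 1)
    else j

-- outer while loop of _runs, accumulating the (symbol, length) pairs; same fuel convention
def pvRunsLoop (obs_seq : List Int) : Nat → Int → List (Int × Int) → List (Int × Int)
  | 0, _, runs => runs
  | fuel + 1, i, runs =>
    if i < (obs_seq.length : Int) then
      let j := pvScanRun obs_seq (PySem.List.pyGetD obs_seq i 0) obs_seq.length (i + 1)
      pvRunsLoop obs_seq fuel j (runs ++ [(PySem.List.pyGetD obs_seq i 0, j - i)])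
    else runs

def compute_homopolymer_stats_alt (obs_seq : List Int) : List (Int × List Int) :=
  let run_lengths : PySem.Dict Int (List Int) :=
    (PySem.List.pyRange 0 4 1).foldl (fun d o => d.insert o []) PySem.Dict.empty
  ((pvRunsLoop obs_seq obs_seq.length 0 []).foldl
      (fun (d : PySem.Dict Int (List Int)) p => d.modify p.1 [] (fun l => l ++ [p.2]))
      run_lengths).items

-- ===== PRECONDITION & SPEC =====
-- Pre_ excludes exactly the inputs on which Python A raises: the empty list (IndexError on reading the first element) and lists with an element outside range(4) (KeyError on run_lengths[current_sym]).
def Pre_compute_homopolymer_stats (obs_seq : List Int) : Prop :=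
  obs_seq ≠ [] ∧ ∀ y ∈ obs_seq, 0 ≤ y ∧ y < 4
instance (obs_seq : List Int) : Decidable (Pre_compute_homopolymer_stats obs_seq) := by
  unfold Pre_compute_homopolymer_stats; infer_instance

def pvWitness_compute_homopolymer_stats : List Int := [0, 0, 2, 2, 2, 1]

def Spec_compute_homopolymer_stats (obs_seq : List Int) (out : List (Int × List Int)) : Prop := out = compute_homopolymer_stats_alt obs_seq
instance (obs_seq : List Int) (out : List (Int × List Int)) : Decidable (Spec_compute_homopolymer_stats obs_seq out) := by unfold Spec_compute_homopolymer_stats; infer_instance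

-- ===== CLAIM (what is proved, stated in full; the proofs are below) =====
def Claim_equal_compute_homopolymer_stats : Prop := ∀ (obs_seq : List Int), Dom_compute_homopolymer_stats obs_seq → Pre_compute_homopolymer_stats obs_seq → Spec_compute_homopolymer_stats obs_seq (compute_homopolymer_stats obs_seq)

-- ===== LEMMAS AND PROOFS =====

-- number of elements equal to x at the head of a list (length of the leading run of x)
def pvCountRun (x : Int) : List Int → Nat
  | [] => 0
  | y :: ys => if y = x then pvCountRun x ys + 1 else 0

-- reference run decomposition, by structural chunk recursion
def pvRunsStruct : List Int → List (Int × Int)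
  | [] => []
  | x :: rest => (x, (pvCountRun x rest : Int) + 1) :: pvRunsStruct (rest.drop (pvCountRun x rest))
termination_by l => l.length
decreasing_by simp [List.length_drop]

-- A's accumulator, reified: the runs still to be emitted given loop state (x, c)
def pvRunsFrom (x : Int) (c : Int) : List Int → List (Int × Int)
  | [] => [(x, c)]
  | y :: ys => if y = x then pvRunsFrom x (c + 1) ys else (x, c) :: pvRunsFrom y 1 ys

theorem pvRunsFrom_eq_struct (rest : List Int) : ∀ (x c : Int),
    pvRunsFrom x c rest
      = (x, c + (pvCountRun x rest : Int)) :: pvRunsStruct (rest.drop (pvCountRun x rest)) := by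
  induction rest with
  | nil => intro x c; simp [pvRunsFrom, pvCountRun, pvRunsStruct]
  | cons y ys ih =>
    intro x c
    by_cases h : y = x
    · subst h
      simp only [pvRunsFrom, ih y (c + 1), pvCountRun, if_true, List.drop_succ_cons]
      congr 2
      push_cast; ring
    · rw [pvRunsFrom]
      simp only [if_neg h, ih y 1]
      simp only [pvCountRun, if_neg h, List.drop_zero]
      rw [pvRunsStruct]
      simp
      ring

-- A's whole loop followed by the final append equals folding the dict update over pvRunsFrom
theorem pvLoopA_eq_runsFrom (rest : List Int) :
    ∀ (d : PySem.Dict Int (List Int)) (x c : Int),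
    (let st := rest.foldl
        (fun (st : PySem.Dict Int (List Int) × Int × Int) o =>
          if o = st.2.1 then (st.1, st.2.1, st.2.2 + 1)
          else (st.1.modify st.2.1 [] (fun l => l ++ [st.2.2]), o, 1))
        (d, x, c)
     st.1.modify st.2.1 [] (fun l => l ++ [st.2.2]))
    = (pvRunsFrom x c rest).foldl
        (fun (d : PySem.Dict Int (List Int)) p => d.modify p.1 [] (fun l => l ++ [p.2])) d := by
  induction rest with
  | nil => intro d x c; simp [pvRunsFrom]
  | cons y ys ih =>
    intro d x c
    by_cases h : y = x
    · simp only [List.foldl_cons, pvRunsFrom, h, if_true]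
      exact ih d x (c + 1)
    · simp only [List.foldl_cons, pvRunsFrom, if_neg h]
      exact ih (d.modify x [] (fun l => l ++ [c])) y 1

theorem pvScanRun_eq (obs_seq : List Int) (x : Int) :
    ∀ (fuel : Nat) (j : Int), 0 ≤ j → (obs_seq.length : Int) ≤ j + fuel →
    pvScanRun obs_seq x fuel j = j + (pvCountRun x (obs_seq.drop j.toNat) : Int) := by
  intro fuel
  induction fuel with
  | zero =>
    intro j hj hlen
    have : obs_seq.drop j.toNat = [] := List.drop_eq_nil_of_le (by omega)
    simp [pvScanRun, this, pvCountRun]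
  | succ n ih =>
    intro j hj hlen
    by_cases hlt : j < (obs_seq.length : Int)
    · have hjn : j.toNat < obs_seq.length := by omega
      have hdrop : obs_seq.drop j.toNat = obs_seq[j.toNat] :: obs_seq.drop (j.toNat + 1) :=
        List.drop_eq_getElem_cons hjn
      have hget : PySem.List.pyGetD obs_seq j 0 = obs_seq[j.toNat] :=
        PySem.List.pyGetD_eq_getElem _ _ hj hlt
      by_cases heq : obs_seq[j.toNat] = x
      · rw [pvScanRun, if_pos ⟨hlt, by rw [hget]; exact heq⟩]
        rw [ih (j + 1) (by omega) (by omega)]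
        have : (j + 1).toNat = j.toNat + 1 := by omega
        rw [this, hdrop, pvCountRun, if_pos heq]
        push_cast; ring
      · rw [pvScanRun, if_neg (by rw [hget]; exact fun hc => heq hc.2)]
        rw [hdrop, pvCountRun, if_neg heq]
        simp
    · have : obs_seq.drop j.toNat = [] := List.drop_eq_nil_of_le (by omega)
      rw [pvScanRun, if_neg (fun hc => hlt hc.1)]
      simp [this, pvCountRun]

theorem pvCountRun_le (x : Int) (l : List Int) : pvCountRun x l ≤ l.length := by
  induction l with
  | nil => simp [pvCountRun]
  | cons y ys ih =>
    by_cases h : y = x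
    · simp [pvCountRun, h]; omega
    · simp [pvCountRun, h]

theorem pvRunsLoop_eq (obs_seq : List Int) :
    ∀ (fuel : Nat) (i : Int) (acc : List (Int × Int)), 0 ≤ i → (obs_seq.length : Int) ≤ i + fuel →
    pvRunsLoop obs_seq fuel i acc = acc ++ pvRunsStruct (obs_seq.drop i.toNat) := by
  intro fuel
  induction fuel with
  | zero =>
    intro i acc hi hlen
    have : obs_seq.drop i.toNat = [] := List.drop_eq_nil_of_le (by omega)
    simp [pvRunsLoop, this, pvRunsStruct]
  | succ n ih =>
    intro i acc hi hlen
    by_cases hlt : i < (obs_seq.length : Int)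
    · have hin : i.toNat < obs_seq.length := by omega
      have hdrop : obs_seq.drop i.toNat = obs_seq[i.toNat] :: obs_seq.drop (i.toNat + 1) :=
        List.drop_eq_getElem_cons hin
      have hget : PySem.List.pyGetD obs_seq i 0 = obs_seq[i.toNat] :=
        PySem.List.pyGetD_eq_getElem _ _ hi hlt
      set x := obs_seq[i.toNat] with hx
      have hcle : pvCountRun x (obs_seq.drop (i.toNat + 1)) ≤ obs_seq.length - (i.toNat + 1) := by
        have := pvCountRun_le x (obs_seq.drop (i.toNat + 1))
        simpa using this
      have hscan : pvScanRun obs_seq x obs_seq.length (i + 1)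
          = i + 1 + (pvCountRun x (obs_seq.drop (i.toNat + 1)) : Int) := by
        have h1 : ((i + 1 : Int)).toNat = i.toNat + 1 := by omega
        rw [pvScanRun_eq obs_seq x obs_seq.length (i + 1) (by omega) (by omega), h1]
      rw [pvRunsLoop, if_pos hlt]
      simp only [hget, hscan]
      set k := pvCountRun x (obs_seq.drop (i.toNat + 1)) with hk
      have hjnat : ((i + 1 + (k : Int))).toNat = i.toNat + 1 + k := by omega
      rw [ih (i + 1 + (k : Int)) _ (by omega) (by omega)]
      rw [hjnat]
      conv_rhs => rw [hdrop, pvRunsStruct]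
      have hdk : (obs_seq.drop (i.toNat + 1)).drop k = obs_seq.drop (i.toNat + 1 + k) := by
        rw [List.drop_drop]
      rw [← hk, hdk]
      simp
      omega
    · have : obs_seq.drop i.toNat = [] := List.drop_eq_nil_of_le (by omega)
      rw [pvRunsLoop, if_neg hlt]
      simp [this, pvRunsStruct]

theorem pv_main (obs_seq : List Int) (hne : obs_seq ≠ []) :
    compute_homopolymer_stats obs_seq = compute_homopolymer_stats_alt obs_seq := by
  obtain ⟨x, rest, rfl⟩ := List.exists_cons_of_ne_nil hne
  unfold compute_homopolymer_stats compute_homopolymer_stats_alt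
  have hget0 : PySem.List.pyGet? (x :: rest) 0 = some x := by simp [pysem]
  rw [hget0]
  simp only
  rw [PySem.List.foldl_pyRange_pyGetD' (x :: rest) 0
        (fun (st : PySem.Dict Int (List Int) × Int × Int) o =>
          if o = st.2.1 then (st.1, st.2.1, st.2.2 + 1)
          else (st.1.modify st.2.1 [] (fun l => l ++ [st.2.2]), o, 1))
        _ (by norm_num : (0:Int) ≤ 1)]
  rw [pvRunsLoop_eq (x :: rest) (x :: rest).length 0 [] le_rfl (by simp)]
  have hA := pvLoopA_eq_runsFrom (List.drop (1:Int).toNat (x :: rest))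
      ((PySem.List.pyRange 0 4 1).foldl
        (fun (d : PySem.Dict Int (List Int)) o => d.insert o []) PySem.Dict.empty) x 1
  simp only at hA ⊢
  rw [hA]
  simp only [Int.toNat_one, Int.toNat_zero, List.drop_succ_cons, List.drop_zero, List.nil_append]
  rw [pvRunsFrom_eq_struct]
  conv_rhs => rw [show pvRunsStruct (x :: rest)
    = (x, (pvCountRun x rest : Int) + 1)
        :: pvRunsStruct (rest.drop (pvCountRun x rest)) from by rw [pvRunsStruct]]
  simp
  rw [show (1 : Int) + (pvCountRun x rest : Int) = (pvCountRun x rest : Int) + 1 from by ring]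

-- ===== VERDICT (by name: the statement is the Claim_ definition above) =====
theorem compute_homopolymer_stats_spec : Claim_equal_compute_homopolymer_stats := by
  intro obs_seq _hdom hpre
  unfold Spec_compute_homopolymer_stats
  exact pv_main obs_seq hpre.1
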